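-- pv_equiv track=rewrite | github.com/strubelab/alphafold | bin/clustering.py | merge_dict_values
-- ===== SOURCE A (Python) =====
-- from typing import Dict, Set, Union, Tuple
--
-- def merge_dict_values(unmerged_dict:Dict[str, Set[str]]) -> Dict[str, Set[str]]:
--     """
--     Take a dictionary with sets as values, and merge the sets that have elements
--     in common.
--
--     Args:
--         d (Dict[str, Set[str]]): _description_
--
--     Returns:
--         Dict[str, Set[str]]: _description_
--     """
--
--     joint_dict = {}
--     while unmerged_dict:
--         rep, members = unmerged_dict.popitem()
--
--         if members is None:
--             continue
--
--         merged_members = set()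
--         keys_to_merge = []
--         for rep2, members2 in unmerged_dict.items():
--             if members2 is None:
--                 continue
--             if not members.isdisjoint(members2):    # if they have elements in common
--                 merged_members = merged_members | members | members2
--                 keys_to_merge.append(rep2)
--
--         # Erase the values of the merged clusters
--         for rep2 in keys_to_merge:
--             unmerged_dict[rep2] = None
--
--         if merged_members:
--             joint_dict[rep] = merged_members
--         else:
--             joint_dict[rep] = members
--
--     return joint_dict
-- ===== SOURCE B (Python) =====
-- def merge_dict_values(unmerged_dict):
--     """Same merge as A (LIFO pop order, one non-transitive merge pass per popped
--     key), but intersecting keys are found through an inverted element->positions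
--     index instead of scanning the whole remaining dict for every popped key."""
--     items = list(unmerged_dict.items())
--     n = len(items)
--     index = {}
--     for i, (_, members) in enumerate(items):
--         for el in members:
--             index.setdefault(el, []).append(i)
--     alive = [True] * n
--     result = []
--     for i in range(n - 1, -1, -1):
--         if not alive[i]:
--             continue
--         rep, members = items[i]
--         hits = set()
--         for el in members:
--             for j in index.get(el, ()):
--                 if j < i and alive[j]:
--                     hits.add(j)
--         if hits:
--             merged = set(members)
--             for j in sorted(hits):
--                 merged |= items[j][1]
--                 alive[j] = False
--             result.append((rep, merged))
--         else:
--             result.append((rep, members))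
--     return dict(result)
-- ===== Notes on version B (the rewrite author's own statement) =====
-- stated objective: faster
-- what changed: Instead of re-scanning every remaining dict entry for each popped key (and tombstoning merged keys with None values that later scans must skip), B builds an inverted element->positions index once and, in one reverse pass over the entries with an alive-flag array, looks up only the buckets of the popped set's elements to find the intersecting earlier entries; pop order, per-pop non-transitive merging and the output order are unchanged. Pre_ only requires the assoc-list keys to be pairwise distinct, which is automatic for a Python dict. (A empties its argument dict in place; …
import Mathlib
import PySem

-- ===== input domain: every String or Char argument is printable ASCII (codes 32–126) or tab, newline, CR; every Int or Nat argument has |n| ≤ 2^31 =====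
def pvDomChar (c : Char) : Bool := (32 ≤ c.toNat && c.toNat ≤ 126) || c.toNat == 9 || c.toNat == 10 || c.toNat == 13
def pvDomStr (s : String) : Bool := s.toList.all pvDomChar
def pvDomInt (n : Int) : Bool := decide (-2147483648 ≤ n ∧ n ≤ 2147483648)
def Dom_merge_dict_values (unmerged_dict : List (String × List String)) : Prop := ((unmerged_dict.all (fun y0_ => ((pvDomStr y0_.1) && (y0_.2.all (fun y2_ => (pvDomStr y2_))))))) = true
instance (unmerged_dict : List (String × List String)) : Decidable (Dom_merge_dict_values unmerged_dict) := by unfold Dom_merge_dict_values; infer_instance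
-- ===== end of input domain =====

-- B replaces A's per-pop scan of the whole remaining dict by an inverted element->positions
-- index consulted once per popped set (objective: faster).  A empties its argument dict in
-- place, B does not mutate it: the equivalence proved here is about the return value.

-- ===== PORT A =====
-- the inner 'for rep2, members2 in unmerged_dict.items()' loop: collect (merged_members, keys_to_merge)
def pvScanA (members : List String) (d : List (String × Option (List String))) :
    List String × List String :=
  d.foldl (fun acc p =>
    match p.2 with
    | none => acc
    | some m2 =>
      if PySem.Set.isdisjoint members m2 then acc
      else (PySem.Set.union (PySem.Set.union acc.1 members) m2, acc.2 ++ [p.1]))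
    ([], [])

-- 'unmerged_dict[rep2] = None': overwrite the value at the first occurrence of the key
def pvSetNone (d : List (String × Option (List String))) (k : String) :
    List (String × Option (List String)) :=
  match d with
  | [] => []
  | p :: t => if p.1 == k then (p.1, none) :: t else p :: pvSetNone t k

-- (used only by the termination argument of pvGoA)
theorem pvSetNone_length (d : List (String × Option (List String))) (k : String) :
    (pvSetNone d k).length = d.length := by
  induction d with
  | nil => rfl
  | cons p t ih => by_cases h : p.1 == k <;> simp [pvSetNone, h, ih]

theorem pvFoldSetNone_length (ks : List String) (d : List (String × Option (List String))) :
    (ks.foldl pvSetNone d).length = d.length := by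
  induction ks generalizing d with
  | nil => rfl
  | cons k t ih => simp [List.foldl_cons, ih, pvSetNone_length]

-- the 'while unmerged_dict: rep, members = unmerged_dict.popitem(); …' loop
def pvGoA (d : List (String × Option (List String)))
    (joint : PySem.Dict String (List String)) : PySem.Dict String (List String) :=
  if hne : d = [] then joint
  else
    let p := d.getLast hne
    let d' := d.dropLast
    match p.2 with
    | none => pvGoA d' joint
    | some members =>
      let s := pvScanA members d'
      let d'' := s.2.foldl pvSetNone d'
      pvGoA d'' (joint.insert p.1 (if s.1 = [] then members else s.1))
termination_by d.length
decreasing_by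
  · have h0 : 0 < d.length := List.length_pos_of_ne_nil hne
    simp only [List.length_dropLast]; omega
  · have h0 : 0 < d.length := List.length_pos_of_ne_nil hne
    have h1 := pvFoldSetNone_length (pvScanA members d.dropLast).2 d.dropLast
    simp only [List.length_dropLast] at h1 ⊢; omega

def merge_dict_values (unmerged_dict : List (String × List String)) : List (String × List String) :=
  (pvGoA (unmerged_dict.map (fun p => (p.1, some p.2))) PySem.Dict.empty).items

-- ===== PORT B =====
-- build the inverted index: element -> ascending list of positions whose set contains it
def pvIndexB (items : List (String × List String)) : PySem.Dict String (List Int) :=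
  (PySem.List.enumerate items 0).foldl
    (fun d q => q.2.2.foldl (fun d el => d.modify el [] (· ++ [q.1])) d)
    PySem.Dict.empty

-- the 'for i in range(n - 1, -1, -1)' loop; counter c means current position i = c - 1.
-- items[i] / items[j][1] are ported with getD: the positions come from range(n) and the
-- index buckets, so they are always in range.
def pvGoB (items : List (String × List String)) (index : PySem.Dict String (List Int)) :
    Nat → List Bool → List (String × List String) → List (String × List String)
  | 0, _, result => result
  | i + 1, alive, result =>
    if alive.getD i false = true then
      let p := items.getD i ("", [])
      let hits : PySem.Set Int := p.2.foldl
        (fun h el => (index.getD el []).foldl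
          (fun h j => if j < (i : Int) ∧ alive.getD j.toNat false = true then PySem.Set.add h j else h) h)
        PySem.Set.empty
      if hits = [] then
        pvGoB items index i alive (result ++ [(p.1, p.2)])
      else
        let sh := PySem.List.sorted hits (fun x => x) false
        let s := sh.foldl
          (fun (acc : List String × List Bool) j =>
            (PySem.Set.union acc.1 (items.getD j.toNat ("", [])).2, acc.2.set j.toNat false))
          (PySem.Set.ofList p.2, alive)
        pvGoB items index i s.2 (result ++ [(p.1, s.1)])
    else
      pvGoB items index i alive result

-- Python B returns dict(result); the keys appended to result are pairwise distinct under
-- Pre_, so dict(result) is result itself as an association list.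
def merge_dict_values_alt (unmerged_dict : List (String × List String)) : List (String × List String) :=
  pvGoB unmerged_dict (pvIndexB unmerged_dict) unmerged_dict.length
    (List.replicate unmerged_dict.length true) []

-- ===== PRECONDITION & SPEC =====
-- The argument is a Python dict, so its keys are distinct; Pre_ states exactly that for the
-- association list (duplicate-key lists cannot arise from a dict argument).
def Pre_merge_dict_values (unmerged_dict : List (String × List String)) : Prop :=
  (unmerged_dict.map Prod.fst).Nodup
instance (unmerged_dict : List (String × List String)) : Decidable (Pre_merge_dict_values unmerged_dict) := by
  unfold Pre_merge_dict_values; infer_instance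

def pvWitness_merge_dict_values : (List (String × List String)) :=
  [("a", ["x", "y"]), ("b", ["y", "z"]), ("c", ["q"])]

def Spec_merge_dict_values (unmerged_dict : List (String × List String)) (out : List (String × List String)) : Prop := out = merge_dict_values_alt unmerged_dict
instance (unmerged_dict : List (String × List String)) (out : List (String × List String)) : Decidable (Spec_merge_dict_values unmerged_dict out) := by unfold Spec_merge_dict_values; infer_instance

-- ===== CLAIM (what is proved, stated in full; the proofs are below) =====
def Claim_equal_merge_dict_values : Prop := ∀ (unmerged_dict : List (String × List String)), Dom_merge_dict_values unmerged_dict → Pre_merge_dict_values unmerged_dict → Spec_merge_dict_values unmerged_dict (merge_dict_values unmerged_dict)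

-- ===== LEMMAS AND PROOFS =====

-- proof-side views of the input
def pvKey (u : List (String × List String)) (j : Nat) : String := (u.getD j ("", [])).1
def pvVal (u : List (String × List String)) (j : Nat) : List String := (u.getD j ("", [])).2
def pvEntry (u : List (String × List String)) (alive : List Bool) (j : Nat) :
    String × Option (List String) :=
  (pvKey u j, if alive.getD j false = true then some (pvVal u j) else none)
def pvMask (u : List (String × List String)) (alive : List Bool) (i : Nat) :
    List (String × Option (List String)) :=
  (List.range i).map (pvEntry u alive)

-- the positions the step at i merges with, as a Bool predicate over range i
def pvHitP (u : List (String × List String)) (alive : List Bool) (members : List String)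
    (j : Nat) : Bool :=
  alive.getD j false && !PySem.Set.isdisjoint members (pvVal u j)

-- ---- unfolding lemmas for the two loops ----

theorem pvGoA_nil (joint : PySem.Dict String (List String)) : pvGoA [] joint = joint := by
  unfold pvGoA; rfl

theorem pvGoA_concat_none (l : List (String × Option (List String))) (k : String)
    (joint : PySem.Dict String (List String)) :
    pvGoA (l ++ [(k, none)]) joint = pvGoA l joint := by
  conv_lhs => unfold pvGoA
  rw [dif_neg (by simp : ¬(l ++ [((k : String), (none : Option (List String)))] = []))]
  simp

theorem pvGoA_concat_some (l : List (String × Option (List String))) (k : String)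
    (members : List String) (joint : PySem.Dict String (List String)) :
    pvGoA (l ++ [(k, some members)]) joint
      = pvGoA ((pvScanA members l).2.foldl pvSetNone l)
          (joint.insert k (if (pvScanA members l).1 = [] then members else (pvScanA members l).1)) := by
  conv_lhs => unfold pvGoA
  rw [dif_neg (by simp : ¬(l ++ [((k : String), some members)] = []))]
  simp

-- ---- characterisation of A's inner scan over a masked prefix ----

theorem pvScanA_mask (u : List (String × List String)) (alive : List Bool)
    (members : List String) (i : Nat) :
    pvScanA members (pvMask u alive i) =
      (((List.range i).filter (pvHitP u alive members)).foldl
          (fun m j => PySem.Set.union (PySem.Set.union m members) (pvVal u j)) [],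
       ((List.range i).filter (pvHitP u alive members)).map (pvKey u)) := by
  induction i with
  | zero => rfl
  | succ i ih =>
    have hm : pvMask u alive (i + 1) = pvMask u alive i ++ [pvEntry u alive i] := by
      simp [pvMask, List.range_succ]
    rw [hm]
    unfold pvScanA at ih ⊢
    rw [List.foldl_append, ih, List.range_succ, List.filter_append]
    simp only [List.foldl_cons, List.foldl_nil, List.filter_cons, List.filter_nil]
    by_cases ha : alive.getD i false = true
    · have he : pvEntry u alive i = (pvKey u i, some (pvVal u i)) := by
        simp only [pvEntry, ha, if_true]
      rw [he]
      dsimp only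
      by_cases hd : PySem.Set.isdisjoint members (pvVal u i) = true
      · have hP : pvHitP u alive members i = false := by
          unfold pvHitP; rw [ha, hd]; rfl
        rw [if_pos hd, hP]
        first | rfl | simp
      · have hd' : PySem.Set.isdisjoint members (pvVal u i) = false :=
          Bool.eq_false_iff.mpr hd
        have hP : pvHitP u alive members i = true := by
          unfold pvHitP; rw [ha, hd']; rfl
        rw [if_neg hd, hP]
        first | rfl | simp [List.foldl_append, List.map_append]
    · have ha' : alive.getD i false = false := Bool.eq_false_iff.mpr ha
      have he : pvEntry u alive i = (pvKey u i, none) := by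
        simp only [pvEntry, ha', Bool.false_eq_true, if_false]
      rw [he]
      dsimp only
      have hP : pvHitP u alive members i = false := by
        unfold pvHitP; rw [ha']; rfl
      rw [hP]
      first | rfl | simp

-- ---- characterisation of B's inverted index (membership only) ----

theorem pvInner_getD (members : List String) (iv : Int) (d : PySem.Dict String (List Int))
    (el : String) :
    (members.foldl (fun d el' => d.modify el' [] (· ++ [iv])) d).getD el []
      = d.getD el [] ++ ((members.map (fun e => (e, iv))).filter (fun p => p.1 == el)).map (·.2) := by
  have h : members.foldl (fun d el' => d.modify el' [] (· ++ [iv])) d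
      = (members.map (fun e => (e, iv))).foldl (fun d p => d.modify p.1 [] (· ++ [p.2])) d := by
    rw [List.foldl_map]
  rw [h, PySem.Dict.getD_foldl_modify_append]

theorem pvInner_mem (members : List String) (iv : Int) (d : PySem.Dict String (List Int))
    (el : String) (v : Int) :
    v ∈ (members.foldl (fun d el' => d.modify el' [] (· ++ [iv])) d).getD el []
      ↔ v ∈ d.getD el [] ∨ (el ∈ members ∧ v = iv) := by
  rw [pvInner_getD]
  simp only [List.mem_append, List.mem_map, List.mem_filter]
  constructor
  · rintro (h | ⟨p, ⟨hp, hpe⟩, rfl⟩)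
    · exact Or.inl h
    · obtain ⟨e, he, rfl⟩ := hp
      simp only [beq_iff_eq] at hpe
      exact Or.inr ⟨hpe ▸ he, rfl⟩
  · rintro (h | ⟨hel, rfl⟩)
    · exact Or.inl h
    · exact Or.inr ⟨(el, v), ⟨⟨el, hel, rfl⟩, by simp⟩, rfl⟩

theorem pvIndexB_gen (xs : List (String × List String)) (s : Int)
    (d : PySem.Dict String (List Int)) (el : String) (v : Int) :
    v ∈ ((PySem.List.enumerate xs s).foldl
          (fun d q => q.2.2.foldl (fun d el' => d.modify el' [] (· ++ [q.1])) d) d).getD el []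
      ↔ v ∈ d.getD el [] ∨ ∃ k : Nat, k < xs.length ∧ el ∈ (xs.getD k ("", [])).2 ∧ v = s + k := by
  induction xs generalizing s d with
  | nil => simp [PySem.List.enumerate_nil]
  | cons x t ih =>
    rw [PySem.List.enumerate_cons, List.foldl_cons, ih, pvInner_mem]
    constructor
    · rintro ((h | ⟨hel, rfl⟩) | ⟨k, hk, hkel, rfl⟩)
      · exact Or.inl h
      · exact Or.inr ⟨0, by simp, by simpa using hel, by simp⟩
      · exact Or.inr ⟨k + 1, by simpa using hk, by simpa using hkel, by push_cast; ring⟩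
    · rintro (h | ⟨k, hk, hkel, rfl⟩)
      · exact Or.inl (Or.inl h)
      · cases k with
        | zero => exact Or.inl (Or.inr ⟨by simpa using hkel, by simp⟩)
        | succ k =>
          have hk' : k < t.length := by simp only [List.length_cons] at hk; omega
          exact Or.inr ⟨k, hk', by simpa using hkel, by push_cast; ring⟩

theorem pvIndexB_mem (u : List (String × List String)) (el : String) (v : Int) :
    v ∈ (pvIndexB u).getD el [] ↔ ∃ k : Nat, k < u.length ∧ el ∈ pvVal u k ∧ v = (k : Int) := by
  unfold pvIndexB
  rw [pvIndexB_gen]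
  simp [pvVal, PySem.Dict.getD_empty]

-- ---- tombstoning a masked prefix ----

theorem pvSetNone_eq_set (l : List (String × Option (List String))) (j : Nat)
    (hj : j < l.length)
    (hfresh : ∀ k, k < j → ∀ (hk : k < l.length), (l[k]'hk).1 ≠ (l[j]'hj).1) :
    pvSetNone l ((l[j]'hj).1) = l.set j ((l[j]'hj).1, none) := by
  induction l generalizing j with
  | nil => simp at hj
  | cons p t ih =>
    cases j with
    | zero => simp [pvSetNone]
    | succ j =>
      have hjt : j < t.length := by simpa using hj
      have hne : ¬(p.1 == (t[j]'hjt).1) = true := by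
        have h0 := hfresh 0 (Nat.succ_pos _) (by simp)
        simpa [beq_iff_eq] using h0
      simp only [List.getElem_cons_succ]
      rw [pvSetNone, if_neg hne, List.set_cons_succ]
      congr 1
      exact ih j hjt (fun k hk hk' => by
        have := hfresh (k + 1) (by omega) (by simpa using hk')
        simpa using this)

theorem pvMask_set (u : List (String × List String)) (alive : List Bool)
    (halen : alive.length = u.length) (i j : Nat) (hj : j < i) (hi : i ≤ u.length) :
    pvMask u (alive.set j false) i = (pvMask u alive i).set j (pvKey u j, none) := by
  apply List.ext_getElem
  · simp [pvMask]
  · intro k hk1 hk2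
    have hki : k < i := by simpa [pvMask] using hk1
    simp only [pvMask, List.getElem_map, List.getElem_range, List.getElem_set]
    by_cases hkj : j = k
    · subst hkj
      have hset : (alive.set j false)[j]?.getD false = false := by
        rw [List.getElem?_set_self (by omega)]; rfl
      simp [pvEntry, List.getD_eq_getElem?_getD, hset]
    · have hset : (alive.set j false)[k]? = alive[k]? := List.getElem?_set_ne hkj
      simp [pvEntry, List.getD_eq_getElem?_getD, hset, hkj]

theorem pvKey_ne (u : List (String × List String)) (hnd : (u.map Prod.fst).Nodup)
    (j k : Nat) (hj : j < u.length) (hk : k < u.length) (hne : j ≠ k) :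
    pvKey u j ≠ pvKey u k := by
  have hgj : pvKey u j = (u.map Prod.fst)[j]'(by simpa using hj) := by
    simp [pvKey, List.getD_eq_getElem?_getD, hj]
  have hgk : pvKey u k = (u.map Prod.fst)[k]'(by simpa using hk) := by
    simp [pvKey, List.getD_eq_getElem?_getD, hk]
  rw [hgj, hgk]
  intro h
  exact hne (List.Nodup.getElem_inj_iff hnd |>.mp h)

theorem pvSetNone_mask (u : List (String × List String))
    (hnd : (u.map Prod.fst).Nodup) (alive : List Bool) (halen : alive.length = u.length)
    (i j : Nat) (hj : j < i) (hi : i ≤ u.length) :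
    pvSetNone (pvMask u alive i) (pvKey u j) = pvMask u (alive.set j false) i := by
  have hjm : j < (pvMask u alive i).length := by simp [pvMask]; omega
  have hkey : ((pvMask u alive i)[j]'hjm).1 = pvKey u j := by
    simp [pvMask, pvEntry]
  have hfresh : ∀ k, k < j → ∀ (hk : k < (pvMask u alive i).length),
      ((pvMask u alive i)[k]'hk).1 ≠ ((pvMask u alive i)[j]'hjm).1 := by
    intro k hkj hk
    have hki : k < i := by simpa [pvMask] using hk
    have : ((pvMask u alive i)[k]'hk).1 = pvKey u k := by simp [pvMask, pvEntry]
    rw [this, hkey]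
    exact pvKey_ne u hnd k j (by omega) (by omega) (by omega)
  calc pvSetNone (pvMask u alive i) (pvKey u j)
      = pvSetNone (pvMask u alive i) ((pvMask u alive i)[j]'hjm).1 := by rw [hkey]
    _ = (pvMask u alive i).set j (((pvMask u alive i)[j]'hjm).1, none) :=
        pvSetNone_eq_set _ j hjm hfresh
    _ = pvMask u (alive.set j false) i := by rw [hkey, (pvMask_set u alive halen i j hj hi)]

theorem pvFoldSetNone_mask (u : List (String × List String))
    (hnd : (u.map Prod.fst).Nodup) (i : Nat) (hi : i ≤ u.length) :
    ∀ (J : List Nat) (alive : List Bool), alive.length = u.length → (∀ j ∈ J, j < i) →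
    (J.map (pvKey u)).foldl pvSetNone (pvMask u alive i)
      = pvMask u (J.foldl (fun al j => al.set j false) alive) i := by
  intro J
  induction J with
  | nil => intro alive _ _; rfl
  | cons j t ih =>
    intro alive halen hJ
    simp only [List.map_cons, List.foldl_cons]
    rw [pvSetNone_mask u hnd alive halen i j (hJ j (by simp)) hi]
    exact ih (alive.set j false) (by simp [halen]) (fun x hx => hJ x (by simp [hx]))

theorem pvFoldSet_length (J : List Nat) (alive : List Bool) :
    (J.foldl (fun al j => al.set j false) alive).length = alive.length := by
  induction J generalizing alive with
  | nil => rfl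
  | cons j t ih => simp [List.foldl_cons, ih]

-- ---- membership / nodup of B's hits set ----

theorem pvAddFold_mem (q : Int → Prop) [DecidablePred q] (l : List Int) (h : List Int)
    (v : Int) :
    v ∈ l.foldl (fun h j => if q j then PySem.Set.add h j else h) h
      ↔ v ∈ h ∨ (v ∈ l ∧ q v) := by
  induction l generalizing h with
  | nil => simp
  | cons a t ih =>
    simp only [List.foldl_cons]
    rw [ih]
    by_cases hq : q a
    · rw [if_pos hq]
      rw [PySem.Set.mem_add]
      constructor
      · rintro ((h1 | rfl) | ⟨h1, h2⟩)
        · exact Or.inl h1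
        · exact Or.inr ⟨by simp, hq⟩
        · exact Or.inr ⟨by simp [h1], h2⟩
      · rintro (h1 | ⟨h1, h2⟩)
        · exact Or.inl (Or.inl h1)
        · rcases List.mem_cons.mp h1 with rfl | h1
          · exact Or.inl (Or.inr rfl)
          · exact Or.inr ⟨h1, h2⟩
    · rw [if_neg hq]
      constructor
      · rintro (h1 | ⟨h1, h2⟩)
        · exact Or.inl h1
        · exact Or.inr ⟨by simp [h1], h2⟩
      · rintro (h1 | ⟨h1, h2⟩)
        · exact Or.inl h1
        · rcases List.mem_cons.mp h1 with rfl | h1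
          · exact absurd h2 hq
          · exact Or.inr ⟨h1, h2⟩

theorem pvAddFold_nodup (q : Int → Prop) [DecidablePred q] (l : List Int) (h : List Int)
    (hh : h.Nodup) :
    (l.foldl (fun h j => if q j then PySem.Set.add h j else h) h).Nodup := by
  induction l generalizing h with
  | nil => exact hh
  | cons a t ih =>
    simp only [List.foldl_cons]
    by_cases hq : q a
    · rw [if_pos hq]; exact ih _ (PySem.Set.nodup_add _ _ hh)
    · rw [if_neg hq]; exact ih _ hh

theorem pvHitsFold_mem (members : List String) (bucket : String → List Int)
    (q : Int → Prop) [DecidablePred q] (h0 : List Int) (v : Int) :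
    v ∈ members.foldl
        (fun h el => (bucket el).foldl (fun h j => if q j then PySem.Set.add h j else h) h) h0
      ↔ v ∈ h0 ∨ ∃ el ∈ members, v ∈ bucket el ∧ q v := by
  induction members generalizing h0 with
  | nil => simp
  | cons e t ih =>
    simp only [List.foldl_cons]
    rw [ih, pvAddFold_mem]
    constructor
    · rintro ((h1 | ⟨h1, h2⟩) | ⟨el, h1, h2, h3⟩)
      · exact Or.inl h1
      · exact Or.inr ⟨e, by simp, h1, h2⟩
      · exact Or.inr ⟨el, by simp [h1], h2, h3⟩
    · rintro (h1 | ⟨el, h1, h2, h3⟩)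
      · exact Or.inl (Or.inl h1)
      · rcases List.mem_cons.mp h1 with rfl | h1
        · exact Or.inl (Or.inr ⟨h2, h3⟩)
        · exact Or.inr ⟨el, h1, h2, h3⟩

theorem pvHitsFold_nodup (members : List String) (bucket : String → List Int)
    (q : Int → Prop) [DecidablePred q] (h0 : List Int) (hh : h0.Nodup) :
    (members.foldl
        (fun h el => (bucket el).foldl (fun h j => if q j then PySem.Set.add h j else h) h)
        h0).Nodup := by
  induction members generalizing h0 with
  | nil => exact hh
  | cons e t ih =>
    simp only [List.foldl_cons]
    exact ih _ (pvAddFold_nodup _ _ _ hh)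

-- 'not members.isdisjoint(members2)': the two lists share an element
theorem pvNotDisjoint_iff (s t : List String) :
    (!PySem.Set.isdisjoint s t) = true ↔ ∃ x ∈ s, x ∈ t := by
  simp [PySem.Set.isdisjoint, PySem.Set.contains, List.any_eq_true]

-- ---- merged-set equality ----

theorem pvUnion_absorb (s t : List String) (h : ∀ x ∈ t, x ∈ s) :
    PySem.Set.union s t = s := by
  unfold PySem.Set.union PySem.Set.update
  induction t generalizing s with
  | nil => rfl
  | cons a t ih =>
    simp only [List.foldl_cons]
    rw [PySem.Set.add_of_mem (h a (by simp))]
    exact ih s (fun x hx => h x (by simp [hx]))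

theorem pvMem_foldl_union (val : Nat → List String) (J : List Nat) (acc : List String)
    (x : String) (hx : x ∈ acc) :
    x ∈ J.foldl (fun m j => PySem.Set.union m (val j)) acc := by
  induction J generalizing acc with
  | nil => exact hx
  | cons j t ih =>
    simp only [List.foldl_cons]
    exact ih _ ((PySem.Set.mem_union _ _ _).mpr (Or.inl hx))

theorem pvMergeFold_eq (members : List String) (val : Nat → List String) (J : List Nat) :
    ∀ acc : List String, (∀ x ∈ members, x ∈ acc) →
    J.foldl (fun m j => PySem.Set.union (PySem.Set.union m members) (val j)) acc
      = J.foldl (fun m j => PySem.Set.union m (val j)) acc := by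
  induction J with
  | nil => intro acc _; rfl
  | cons j t ih =>
    intro acc h
    simp only [List.foldl_cons]
    rw [pvUnion_absorb acc members h]
    exact ih _ (fun x hx => (PySem.Set.mem_union _ _ _).mpr (Or.inl (h x hx)))

-- ---- the main simulation ----

theorem pvMain (u : List (String × List String)) (hnd : (u.map Prod.fst).Nodup) :
    ∀ i : Nat, i ≤ u.length → ∀ alive : List Bool, alive.length = u.length →
    ∀ joint : PySem.Dict String (List String), joint.keys.Nodup →
    (∀ j : Nat, j < i → pvKey u j ∉ joint.keys) →
    (pvGoA (pvMask u alive i) joint).items = pvGoB u (pvIndexB u) i alive joint.items := by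
  intro i
  induction i with
  | zero =>
    intro _ alive _ joint _ _
    simp [pvMask, pvGoA_nil, pvGoB]
  | succ i ih =>
    intro hi alive halen joint hjnd hfresh
    have hin : i < u.length := by omega
    have hmask : pvMask u alive (i + 1) = pvMask u alive i ++ [pvEntry u alive i] := by
      simp [pvMask, List.range_succ]
    have hp1 : (u.getD i ("", [])).1 = pvKey u i := rfl
    by_cases ha : alive.getD i false = true
    · -- the popped entry is alive
      set members := pvVal u i with hmembers
      have hp2 : (u.getD i ("", [])).2 = members := rfl
      have hentry : pvEntry u alive i = (pvKey u i, some members) := by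
        simp only [pvEntry, ha, if_true, hmembers]
      set J := (List.range i).filter (pvHitP u alive members) with hJ
      set M := J.foldl (fun m j => PySem.Set.union (PySem.Set.union m members) (pvVal u j)) []
        with hM
      have hJlt' : ∀ j ∈ J, j < i := fun j hj => List.mem_range.mp (List.mem_filter.mp hj).1
      -- A side: one unfolding step
      rw [hmask, hentry, pvGoA_concat_some, pvScanA_mask u alive members i, ← hJ]
      dsimp only
      rw [← hM, pvFoldSetNone_mask u hnd i (by omega) J alive halen hJlt']
      -- B side: one unfolding step
      rw [pvGoB]
      rw [if_pos ha]
      simp only [hp1, hp2]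
      set hits : List Int := members.foldl
        (fun h el => ((pvIndexB u).getD el []).foldl
          (fun h j => if j < (i : Int) ∧ alive.getD j.toNat false = true then PySem.Set.add h j
            else h) h)
        PySem.Set.empty with hhits
      have hits_mem : ∀ v : Int, v ∈ hits ↔ v ∈ J.map (fun k : Nat => (k : Int)) := by
        intro v
        rw [hhits, pvHitsFold_mem]
        simp only [PySem.Set.empty, List.not_mem_nil, false_or]
        constructor
        · rintro ⟨el, hel, hbucket, hv1, hv2⟩
          rw [pvIndexB_mem] at hbucket
          obtain ⟨k, hk, hkel, rfl⟩ := hbucket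
          have hki : k < i := by exact_mod_cast hv1
          refine List.mem_map.mpr ⟨k, List.mem_filter.mpr ⟨List.mem_range.mpr hki, ?_⟩, rfl⟩
          unfold pvHitP
          rw [Bool.and_eq_true]
          refine ⟨by simpa using hv2, ?_⟩
          rw [pvNotDisjoint_iff]
          exact ⟨el, hel, hkel⟩
        · intro hv
          obtain ⟨k, hk, rfl⟩ := List.mem_map.mp hv
          have hki : k < i := List.mem_range.mp (List.mem_filter.mp hk).1
          have hkp := (List.mem_filter.mp hk).2
          unfold pvHitP at hkp
          rw [Bool.and_eq_true] at hkp
          obtain ⟨hkal, hkdis⟩ := hkp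
          obtain ⟨el, hel, hkel⟩ := (pvNotDisjoint_iff _ _).mp hkdis
          refine ⟨el, hel, ?_, by exact_mod_cast hki, by simpa using hkal⟩
          rw [pvIndexB_mem]
          exact ⟨k, by omega, hkel, rfl⟩
      have hits_nodup : hits.Nodup := by
        rw [hhits]; exact pvHitsFold_nodup _ _ _ _ List.nodup_nil
      have hJnd : J.Nodup := List.Nodup.filter _ List.nodup_range
      have hJlt : J.Pairwise (· < ·) := List.Pairwise.filter _ List.pairwise_lt_range
      -- freshness of the inserted key
      have hcont : joint.contains (pvKey u i) = false := by
        cases hc : joint.contains (pvKey u i)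
        · rfl
        · exact absurd ((PySem.Dict.contains_iff_mem_keys _ _).mp hc) (hfresh i (by omega))
      have hkeys' : ∀ (v : List String), (joint.insert (pvKey u i) v).keys.Nodup ∧
          (∀ j : Nat, j < i → pvKey u j ∉ (joint.insert (pvKey u i) v).keys) ∧
          (joint.insert (pvKey u i) v).items = joint.items ++ [(pvKey u i, v)] := by
        intro v
        have hk := PySem.Dict.keys_insert_of_not_contains joint v hcont
        refine ⟨?_, ?_, PySem.Dict.items_insert_of_not_contains joint v hcont⟩
        · rw [hk]
          exact List.Nodup.append hjnd (List.nodup_singleton _)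
            (by
              intro a haj hb
              simp only [List.mem_singleton] at hb
              subst hb
              exact hfresh i (by omega) haj)
        · intro j hj
          rw [hk]
          intro hmem
          rcases List.mem_append.mp hmem with h1 | h1
          · exact hfresh j (by omega) h1
          · simp only [List.mem_singleton] at h1
            exact pvKey_ne u hnd j i (by omega) hin (by omega) h1
      by_cases hJe : J = []
      · -- no intersecting earlier entry: A stores members, B appends (rep, members)
        have hMnil : M = [] := by rw [hM, hJe]; rfl
        have hhits_nil : hits = [] := by
          rw [List.eq_nil_iff_forall_not_mem]
          intro v hv
          rw [hits_mem v, hJe] at hv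
          simp at hv
        rw [if_pos hMnil, if_pos hhits_nil]
        have halive' : J.foldl (fun al j => al.set j false) alive = alive := by
          rw [hJe]; rfl
        rw [halive']
        obtain ⟨hnd', hfresh', hitems'⟩ := hkeys' members
        rw [← hitems']
        exact ih (by omega) alive halen _ hnd' hfresh'
      · -- at least one intersecting earlier entry
        obtain ⟨j0, Jt, hJcons⟩ := List.exists_cons_of_ne_nil hJe
        have hj0 : j0 ∈ J := by rw [hJcons]; simp
        have hj0i : j0 < i := hJlt' j0 hj0
        have hj0p := (List.mem_filter.mp hj0).2
        unfold pvHitP at hj0p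
        rw [Bool.and_eq_true] at hj0p
        obtain ⟨x0, hx0m, hx0v⟩ := (pvNotDisjoint_iff _ _).mp hj0p.2
        have hhits_ne : hits ≠ [] := by
          intro h0
          have hmem0 : (j0 : Int) ∈ hits := (hits_mem _).mpr (List.mem_map.mpr ⟨j0, hj0, rfl⟩)
          rw [h0] at hmem0
          simp at hmem0
        have hmerged_eq : M = J.foldl (fun m j => PySem.Set.union m (pvVal u j))
            (PySem.Set.ofList members) := by
          rw [hM, hJcons]
          simp only [List.foldl_cons]
          have h1 : PySem.Set.union ([] : List String) members = PySem.Set.ofList members := rfl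
          rw [h1]
          exact pvMergeFold_eq members (pvVal u) Jt _
            (fun x hx => (PySem.Set.mem_union _ _ _).mpr
              (Or.inl ((PySem.Set.mem_ofList _ _).mpr hx)))
        have hMne : M ≠ [] := by
          rw [hmerged_eq]
          exact List.ne_nil_of_mem
            (pvMem_foldl_union (pvVal u) J _ x0 ((PySem.Set.mem_ofList _ _).mpr hx0m))
        have hsorted : PySem.List.sorted hits (fun x => x) false
            = J.map (fun k : Nat => (k : Int)) := by
          apply PySem.List.sorted_eq_of_perm_of_pairwise_lt
          · rw [List.perm_ext_iff_of_nodup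
              (List.Nodup.map (fun a b h => by exact_mod_cast h) hJnd) hits_nodup]
            intro v
            exact (hits_mem v).symm
          · rw [List.pairwise_map]
            exact hJlt.imp (fun h => by exact_mod_cast h)
        rw [if_neg hMne, if_neg hhits_ne, hsorted]
        rw [PySem.List.foldl_prod_mk
          (f := fun (m : List String) (j : Int) => PySem.Set.union m (u.getD j.toNat ("", [])).2)
          (g := fun (al : List Bool) (j : Int) => al.set j.toNat false)]
        have hmergedB : (J.map (fun k : Nat => (k : Int))).foldl
              (fun m j => PySem.Set.union m (u.getD j.toNat ("", [])).2)
              (PySem.Set.ofList members)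
            = J.foldl (fun m j => PySem.Set.union m (pvVal u j)) (PySem.Set.ofList members) := by
          rw [List.foldl_map]
          exact PySem.List.foldl_congr_mem _ _ _ _ (by intro acc k _; simp [pvVal])
        have haliveB : (J.map (fun k : Nat => (k : Int))).foldl
              (fun al j => al.set j.toNat false) alive
            = J.foldl (fun al j => al.set j false) alive := by
          rw [List.foldl_map]
          exact PySem.List.foldl_congr_mem _ _ _ _ (by intro acc k _; simp)
        rw [hmergedB, haliveB, ← hmerged_eq]
        obtain ⟨hnd', hfresh', hitems'⟩ := hkeys' M
        rw [← hitems']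
        exact ih (by omega) _ (by rw [pvFoldSet_length]; exact halen) _ hnd' hfresh'
    · -- the popped entry was already tombstoned: both sides skip it
      have ha0 : alive.getD i false = false := Bool.eq_false_iff.mpr ha
      have hentry : pvEntry u alive i = (pvKey u i, none) := by
        unfold pvEntry
        rw [ha0]
        simp
      rw [hmask, hentry, pvGoA_concat_none]
      have hB : pvGoB u (pvIndexB u) (i + 1) alive joint.items
          = pvGoB u (pvIndexB u) i alive joint.items := by
        rw [pvGoB]
        rw [if_neg ha]
      rw [hB]
      exact ih (by omega) alive halen joint hjnd (fun j hj => hfresh j (by omega))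

theorem pvInit_mask (u : List (String × List String)) :
    u.map (fun p => (p.1, some p.2)) = pvMask u (List.replicate u.length true) u.length := by
  apply List.ext_getElem
  · simp [pvMask]
  · intro k hk1 hk2
    have hk : k < u.length := by simpa using hk1
    have hu : u[k]?.getD ("", []) = u[k]'hk := by rw [List.getElem?_eq_getElem hk]; rfl
    have hrep : (List.replicate u.length true)[k]?.getD false = true := by
      simp [hk]
    simp [pvMask, pvEntry, pvKey, pvVal, List.getD_eq_getElem?_getD, hu, hrep]

-- ===== VERDICT (by name: the statement is the Claim_ definition above) =====
theorem merge_dict_values_spec : Claim_equal_merge_dict_values := by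
  intro u _ hpre
  unfold Spec_merge_dict_values merge_dict_values merge_dict_values_alt
  rw [pvInit_mask u]
  have h := pvMain u hpre u.length le_rfl (List.replicate u.length true) (by simp)
    PySem.Dict.empty (by simp [PySem.Dict.keys_empty]) (fun j _ => by simp [PySem.Dict.keys_empty])
  simpa [PySem.Dict.items] using h
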